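-- pv_equiv track=rewrite | github.com/msdkhairi/math2latex | src/data/utils.py | get_formula_length_histogram
-- ===== SOURCE A (Python) =====
-- def get_formula_length_histogram(formulas):
--     histogram = {}
--     for formula in formulas:
--         tokens = formula.split()
--         length = len(tokens)
--         if length in histogram:
--             histogram[length] += 1
--         else:
--             histogram[length] = 1
--     return dict(sorted(histogram.items()))
-- ===== SOURCE B (Python) =====
-- def get_formula_length_histogram(formulas):
--     # Sort the token counts once, then group equal consecutive values in a
--     # single pass, building the dict directly in ascending key order.
--     lengths = sorted(len(f.split()) for f in formulas)
--     result = {}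
--     if not lengths:
--         return result
--     cur, cnt = lengths[0], 1
--     for v in lengths[1:]:
--         if v == cur:
--             cnt += 1
--         else:
--             result[cur] = cnt
--             cur, cnt = v, 1
--     result[cur] = cnt
--     return result
-- ===== Notes on version B (the rewrite author's own statement) =====
-- stated objective: alternative
-- what changed: Replaces the hash-counting dict plus final sort of its items by sorting the list of token counts once and grouping equal consecutive values in a single pass, emitting the histogram directly in ascending key order.
import Mathlib
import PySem

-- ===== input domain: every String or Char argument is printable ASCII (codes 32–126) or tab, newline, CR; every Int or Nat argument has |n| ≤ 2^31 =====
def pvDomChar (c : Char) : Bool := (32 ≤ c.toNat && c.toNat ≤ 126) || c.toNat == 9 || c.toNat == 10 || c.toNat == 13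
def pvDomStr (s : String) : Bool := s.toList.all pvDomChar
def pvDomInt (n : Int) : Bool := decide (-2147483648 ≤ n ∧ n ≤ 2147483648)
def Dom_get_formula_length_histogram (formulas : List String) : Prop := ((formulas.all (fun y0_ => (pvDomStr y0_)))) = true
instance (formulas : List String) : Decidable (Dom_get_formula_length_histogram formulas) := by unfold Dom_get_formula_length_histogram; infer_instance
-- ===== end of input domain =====

-- B replaces A's hash-counting dict + final sort of its items by sorting the token counts
-- once and grouping equal consecutive values in one pass (objective: alternative algorithm).

-- ===== PORT A =====
def get_formula_length_histogram (formulas : List String) : List (Int × Int) :=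
  let histogram := formulas.foldl (fun h formula =>
    let tokens := PySem.Str.split₀ formula
    let length : Int := tokens.length
    if h.contains length then h.modify length 0 (· + 1) else h.insert length 1)
    PySem.Dict.empty
  -- dict keys are distinct, so Python's lexicographic sort of the (key, value) pairs is a sort by key
  PySem.List.sorted histogram.items (fun p => p.1) false

-- ===== PORT B =====
def pvRleGo (cur cnt : Int) : List Int → List (Int × Int)
  | [] => [(cur, cnt)]
  | v :: vs => if v = cur then pvRleGo cur (cnt + 1) vs else (cur, cnt) :: pvRleGo v 1 vs

def get_formula_length_histogram_alt (formulas : List String) : List (Int × Int) :=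
  let lengths := formulas.map (fun f => ((PySem.Str.split₀ f).length : Int))
  match PySem.List.sorted lengths (fun x => x) false with
  | [] => []
  | x :: xs => pvRleGo x 1 xs

-- ===== PRECONDITION & SPEC =====
def Spec_get_formula_length_histogram (formulas : List String) (out : List (Int × Int)) : Prop := out = get_formula_length_histogram_alt formulas
instance (formulas : List String) (out : List (Int × Int)) : Decidable (Spec_get_formula_length_histogram formulas out) := by unfold Spec_get_formula_length_histogram; infer_instance

-- ===== CLAIM (what is proved, stated in full; the proofs are below) =====
def Claim_equal_get_formula_length_histogram : Prop := ∀ (formulas : List String), Dom_get_formula_length_histogram formulas → Spec_get_formula_length_histogram formulas (get_formula_length_histogram formulas)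

-- ===== LEMMAS AND PROOFS =====

-- B's grouping pass as a standalone function (proof helper; equals the match in the port).
def pvRle : List Int → List (Int × Int)
  | [] => []
  | x :: xs => pvRleGo x 1 xs

theorem pvRleGo_spec (s : List Int) (hs : s.Pairwise (· ≤ ·)) (cur cnt : Int)
    (hcur : ∀ y ∈ s, cur ≤ y) :
    pvRleGo cur cnt s = (cur, cnt + (s.count cur : Int)) :: pvRle (s.filter (fun y => y != cur)) := by
  induction s generalizing cur cnt with
  | nil => simp [pvRleGo, pvRle]
  | cons v vs ih =>
    rcases List.pairwise_cons.mp hs with ⟨hv, hvs⟩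
    by_cases hvc : v = cur
    · subst hvc
      rw [show pvRleGo v cnt (v :: vs) = pvRleGo v (cnt + 1) vs from by simp [pvRleGo]]
      rw [ih hvs v (cnt + 1) (fun y hy => hv y hy)]
      have h1 : (((v :: vs).count v : Nat) : Int) = (vs.count v : Int) + 1 := by
        simp
      have h2 : (v :: vs).filter (fun y => y != v) = vs.filter (fun y => y != v) := by
        simp
      rw [h1, h2]
      congr 2
      ring
    · have hlt : cur < v := lt_of_le_of_ne (hcur v (by simp)) (Ne.symm hvc)
      have hnotmem : cur ∉ vs := fun hmem => absurd (hv cur hmem) (not_le.mpr hlt)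
      rw [show pvRleGo cur cnt (v :: vs) = (cur, cnt) :: pvRleGo v 1 vs from by simp [pvRleGo, hvc]]
      have hcount : (v :: vs).count cur = 0 := by
        simp [hvc, List.count_eq_zero.mpr hnotmem]

      have hfilter : (v :: vs).filter (fun y => y != cur) = v :: vs := by
        apply List.filter_eq_self.mpr
        intro a ha
        rcases List.mem_cons.mp ha with h | h
        · simp [h, hvc]
        · simp; intro h'; exact hnotmem (h' ▸ h)
      rw [hcount, hfilter]
      simp [pvRle]

theorem pvRle_spec (n : Nat) : ∀ (s : List Int), s.length ≤ n → s.Pairwise (· ≤ ·) →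
    (pvRle s).Perm ((PySem.Set.ofList s).map (fun k => (k, (s.count k : Int)))) ∧
    (pvRle s).Pairwise (fun p q => p.1 < q.1) := by
  induction n with
  | zero =>
    intro s hlen _
    have : s = [] := List.eq_nil_of_length_eq_zero (Nat.le_zero.mp hlen)
    subst this
    simp [pvRle, PySem.Set.ofList]
  | succ n ih =>
    intro s hlen hs
    match s with
    | [] => simp [pvRle, PySem.Set.ofList]
    | x :: xs =>
      rcases List.pairwise_cons.mp hs with ⟨hx, hxs⟩
      set t := xs.filter (fun y => y != x) with ht
      have htlen : t.length ≤ n := le_trans (List.length_filter_le _ _) (Nat.succ_le_succ_iff.mp hlen)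
      have htpw : t.Pairwise (· ≤ ·) := hxs.filter _
      obtain ⟨ihperm, ihpw⟩ := ih t htlen htpw
      have hrle : pvRle (x :: xs) = (x, 1 + (xs.count x : Int)) :: pvRle t := by
        simpa [pvRle] using pvRleGo_spec xs hxs x 1 hx
      -- counts over t agree with counts over x :: xs for keys in t
      have hcongr : (PySem.Set.ofList t).map (fun k => (k, (t.count k : Int)))
          = (PySem.Set.ofList t).map (fun k => (k, ((x :: xs).count k : Int))) := by
        apply List.map_congr_left
        intro k hk
        have hkt : k ∈ t := (PySem.Set.mem_ofList _ _).mp hk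
        have hkne : k ≠ x := by
          have := List.of_mem_filter hkt
          simpa using this
        have : t.count k = (x :: xs).count k := by
          rw [ht, List.count_filter (by simpa [bne_iff_ne] using hkne)]
          simp [Ne.symm hkne]
        rw [this]
      -- ofList t is a permutation of discard (ofList xs) x
      have hperm2 : (PySem.Set.ofList t).Perm (PySem.Set.discard (PySem.Set.ofList xs) x) := by
        rw [List.perm_ext_iff_of_nodup (PySem.Set.nodup_ofList _)
          (PySem.Set.nodup_discard _ x (PySem.Set.nodup_ofList _))]
        intro a
        rw [PySem.Set.mem_ofList, PySem.Set.mem_discard, PySem.Set.mem_ofList, ht]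
        constructor
        · intro h; exact ⟨List.mem_of_mem_filter h, by simpa using List.of_mem_filter h⟩
        · intro ⟨h1, h2⟩; exact List.mem_filter.mpr ⟨h1, by simpa using h2⟩
      constructor
      · rw [hrle, PySem.Set.ofList_cons]
        have hhead : ((x :: xs).count x : Int) = 1 + (xs.count x : Int) := by
          simp; ring
        refine List.Perm.trans (List.Perm.cons _ ihperm) ?_
        rw [hcongr]
        refine List.Perm.trans (List.Perm.cons _ (hperm2.map _)) ?_
        rw [List.map_cons, hhead]
      · rw [hrle]
        apply List.pairwise_cons.mpr
        refine ⟨?_, ihpw⟩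
        intro p hp
        have hpmem : p ∈ (PySem.Set.ofList t).map (fun k => (k, (t.count k : Int))) :=
          ihperm.mem_iff.mp hp
        obtain ⟨k, hk, hpk⟩ := List.mem_map.mp hpmem
        have hkt : k ∈ t := (PySem.Set.mem_ofList _ _).mp hk
        have hkne : k ≠ x := by simpa using List.of_mem_filter hkt
        have hkxs : k ∈ xs := List.mem_of_mem_filter hkt
        have : x < k := lt_of_le_of_ne (hx k hkxs) (Ne.symm hkne)
        rw [← hpk]
        simpa using this

-- A's counting loop is Counter(lengths)
theorem portA_dict_eq (formulas : List String) :
    formulas.foldl (fun h formula =>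
      let tokens := PySem.Str.split₀ formula
      let length : Int := tokens.length
      if h.contains length then h.modify length 0 (· + 1) else h.insert length 1)
      PySem.Dict.empty
    = PySem.Dict.counter (formulas.map (fun f => ((PySem.Str.split₀ f).length : Int))) := by
  rw [PySem.Dict.counter_eq_foldl, List.foldl_map]
  congr 1
  funext h f
  by_cases hc : h.contains ((PySem.Str.split₀ f).length : Int)
  · simp [hc]
  · simp only [Bool.not_eq_true] at hc
    have h0 : h.getD ((PySem.Str.split₀ f).length : Int) 0 = 0 := by
      simp [PySem.Dict.getD_of_not_contains, hc]
    simp [hc, PySem.Dict.modify, h0]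

theorem portB_eq_rle (formulas : List String) :
    get_formula_length_histogram_alt formulas
      = pvRle (PySem.List.sorted (formulas.map (fun f => ((PySem.Str.split₀ f).length : Int))) (fun x => x) false) := by
  show (match PySem.List.sorted (formulas.map (fun f => ((PySem.Str.split₀ f).length : Int))) (fun x => x) false with
        | [] => ([] : List (Int × Int))
        | x :: xs => pvRleGo x 1 xs) = _
  generalize PySem.List.sorted (formulas.map (fun f => ((PySem.Str.split₀ f).length : Int))) (fun x => x) false = s
  cases s <;> rfl

-- ===== VERDICT (by name: the statement is the Claim_ definition above) =====
theorem get_formula_length_histogram_spec : Claim_equal_get_formula_length_histogram := by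
  intro formulas _
  unfold Spec_get_formula_length_histogram get_formula_length_histogram
  rw [portA_dict_eq, portB_eq_rle]
  set M := formulas.map (fun f => ((PySem.Str.split₀ f).length : Int)) with hM
  set S := PySem.List.sorted M (fun x => x) false with hS
  have hSperm : S.Perm M := PySem.List.sorted_perm M _ false
  have hSpw : S.Pairwise (· ≤ ·) := by
    simpa using PySem.List.sorted_pairwise M (fun x => x)
  obtain ⟨hperm, hpw⟩ := pvRle_spec S.length S le_rfl hSpw
  apply PySem.List.sorted_eq_of_perm_of_pairwise_lt
  · rw [PySem.Dict.items_counter]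
    have hcount : (PySem.Set.ofList S).map (fun k => (k, (S.count k : Int)))
        = (PySem.Set.ofList S).map (fun k => (k, (M.count k : Int))) := by
      apply List.map_congr_left
      intro k _
      rw [hSperm.count_eq]
    have hsets : (PySem.Set.ofList S).Perm (PySem.Set.ofList M) := by
      rw [List.perm_ext_iff_of_nodup (PySem.Set.nodup_ofList _) (PySem.Set.nodup_ofList _)]
      intro a
      rw [PySem.Set.mem_ofList, PySem.Set.mem_ofList]
      exact hSperm.mem_iff
    exact hperm.trans ((hcount ▸ (hsets.map _) : _))
  · exact hpw
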